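-- pv_equiv track=rewrite | github.com/tjddls1124/Algorithm | kakao/kakao_brain_1.py | encryptionValidity
-- ===== SOURCE A (Python) =====
-- def encryptionValidity(instructionCount, validityPeriod, keys):
--     checks = instructionCount * validityPeriod
--     res = []
--     max_div = 0
--
--     valid = [0 for i in range(pow(10,5))]
--
--     keys = sorted(keys, key=lambda x:-x)
--
--     for key in keys:
--         count = 0
--         for t in keys:
--             if key % t == 0 :
--
--                 count+=1
--         max_div = max(max_div,count)
--
--
--
--     stren = pow(10,5) * max_div
--     if checks > stren:
--         res.append(1)
--     else:
--         res.append(0)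
--
--     res.append(stren)
--
--     return res
-- ===== SOURCE B (Python) =====
-- def encryptionValidity(instructionCount, validityPeriod, keys):
--     # Count multiplicities once, then for each distinct key value u count the keys
--     # dividing u by enumerating the divisors of |u| in pairs (d, |u|//d) with d*d <= |u|
--     # and summing the multiplicities of +d and -d, instead of A's all-pairs key scan.
--     freq = {}
--     for k in keys:
--         freq[k] = freq.get(k, 0) + 1
--     max_div = 0
--     for u in freq:
--         m = abs(u)
--         c = 0
--         d = 1
--         while d * d <= m:
--             if m % d == 0:
--                 c += freq.get(d, 0) + freq.get(-d, 0)
--                 e = m // d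
--                 if e != d:
--                     c += freq.get(e, 0) + freq.get(-e, 0)
--             d += 1
--         if c > max_div:
--             max_div = c
--     stren = 100000 * max_div
--     checks = instructionCount * validityPeriod
--     return [1 if checks > stren else 0, stren]
-- ===== Notes on version B (the rewrite author's own statement) =====
-- stated objective: faster
-- what changed: B builds a value->multiplicity table once and, for each distinct key value u, counts the keys dividing u by enumerating the divisor pairs (d, |u|//d) of |u| for d*d <= |u| and summing the multiplicities of +d and -d, instead of A's sort plus all-pairs key-vs-key scan.
import Mathlib
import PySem

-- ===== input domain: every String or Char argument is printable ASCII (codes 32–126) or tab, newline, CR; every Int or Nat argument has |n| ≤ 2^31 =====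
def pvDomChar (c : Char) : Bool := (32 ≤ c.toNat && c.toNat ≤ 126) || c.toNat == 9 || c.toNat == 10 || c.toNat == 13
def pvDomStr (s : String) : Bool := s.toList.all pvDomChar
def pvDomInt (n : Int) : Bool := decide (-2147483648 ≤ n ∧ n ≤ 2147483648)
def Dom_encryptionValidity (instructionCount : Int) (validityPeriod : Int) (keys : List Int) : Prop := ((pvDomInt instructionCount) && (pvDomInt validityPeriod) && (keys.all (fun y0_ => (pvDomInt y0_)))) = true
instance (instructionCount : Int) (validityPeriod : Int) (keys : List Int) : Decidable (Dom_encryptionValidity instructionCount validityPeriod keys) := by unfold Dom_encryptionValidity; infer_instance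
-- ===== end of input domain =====

-- B replaces A's all-pairs key scan by a multiplicity table plus, for each distinct key value u,
-- an enumeration of the divisor pairs (d, |u|//d) of |u| with d*d ≤ |u| (alternative algorithm;
-- equal return value proved below).

-- ===== PORT A =====
def encryptionValidity (instructionCount : Int) (validityPeriod : Int) (keys : List Int) : List Int :=
  let checks := instructionCount * validityPeriod
  let res : List Int := []
  let maxDiv : Int := 0
  let _valid : List Int := (PySem.List.pyRange 0 (10 ^ 5) 1).map (fun _ => 0)  -- dead, as in A
  let keys' := PySem.List.sorted keys (fun x => -x) false
  let maxDiv := keys'.foldl (fun m key =>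
      max m (keys'.foldl (fun c t => if PySem.Int.mod key t = 0 then c + 1 else c) 0)) maxDiv
  let stren := 10 ^ 5 * maxDiv
  let res := if checks > stren then res ++ [1] else res ++ [0]
  let res := res ++ [stren]
  res

-- ===== PORT B =====
-- B-side helpers: the 'while d * d <= m' divisor-pair loop of Source B, with the standard
-- fuel encoding of the while loop ((m+1-d).toNat bounds the remaining iterations; when the
-- fuel is 0 the guard d*d ≤ m is false, so the encoding is exact)
def pvDivLoopGo (freq : PySem.Dict Int Int) (m : Int) (d : Int) (c : Int) : Nat → Int
  | 0 => c
  | fuel + 1 =>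
    if d * d ≤ m then
      pvDivLoopGo freq m (d + 1)
        (if PySem.Int.mod m d = 0 then
          (if PySem.Int.floordiv m d ≠ d then
             c + (freq.getD d 0 + freq.getD (-d) 0)
               + (freq.getD (PySem.Int.floordiv m d) 0 + freq.getD (-(PySem.Int.floordiv m d)) 0)
           else c + (freq.getD d 0 + freq.getD (-d) 0))
         else c) fuel
    else c

def pvDivLoop (freq : PySem.Dict Int Int) (m : Int) (d : Int) (c : Int) : Int :=
  pvDivLoopGo freq m d c ((m + 1 - d).toNat)

def encryptionValidity_alt (instructionCount : Int) (validityPeriod : Int) (keys : List Int) : List Int :=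
  let freq : PySem.Dict Int Int := keys.foldl (fun d k => d.insert k (d.getD k 0 + 1)) PySem.Dict.empty
  let maxDiv := freq.keys.foldl (fun mx u =>
      let c := pvDivLoop freq (|u|) 1 0
      if c > mx then c else mx) 0
  let stren := 100000 * maxDiv
  let checks := instructionCount * validityPeriod
  [if checks > stren then 1 else 0, stren]

-- ===== PRECONDITION & SPEC =====
-- Pre_ excludes exactly the inputs on which Python A raises ZeroDivisionError (a key equal to 0).
def Pre_encryptionValidity (instructionCount : Int) (validityPeriod : Int) (keys : List Int) : Prop :=
  (0 : Int) ∉ keys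
instance (instructionCount : Int) (validityPeriod : Int) (keys : List Int) : Decidable (Pre_encryptionValidity instructionCount validityPeriod keys) := by unfold Pre_encryptionValidity; infer_instance

def pvWitness_encryptionValidity : Int × Int × List Int := (7, 100000, [2, 4, 8, 4])

def Spec_encryptionValidity (instructionCount : Int) (validityPeriod : Int) (keys : List Int) (out : List Int) : Prop := out = encryptionValidity_alt instructionCount validityPeriod keys
instance (instructionCount : Int) (validityPeriod : Int) (keys : List Int) (out : List Int) : Decidable (Spec_encryptionValidity instructionCount validityPeriod keys out) := by unfold Spec_encryptionValidity; infer_instance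

-- ===== CLAIM (what is proved, stated in full; the proofs are below) =====
def Claim_equal_encryptionValidity : Prop := ∀ (instructionCount : Int) (validityPeriod : Int) (keys : List Int), Dom_encryptionValidity instructionCount validityPeriod keys → Pre_encryptionValidity instructionCount validityPeriod keys → Spec_encryptionValidity instructionCount validityPeriod keys (encryptionValidity instructionCount validityPeriod keys)
-- ===== LEMMAS AND PROOFS =====

-- the divisibility count of u over the multiset keys (what A's inner loop computes)
def pvCnt (keys : List Int) (u : Int) : Int :=
  (keys.countP (fun t => decide (PySem.Int.mod u t = 0)) : Int)

-- the window count B's loop has left to collect when its counter is d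
def pvWin (keys : List Int) (m d : Int) : Int :=
  (keys.countP (fun t => decide (|t| ∣ m ∧ d ≤ |t| ∧ |t| * d ≤ m)) : Int)

-- counting by absolute value = counting the two signed values
theorem pv_countP_abs_eq (l : List Int) (x : Int) (hx : 1 ≤ x) :
    (l.countP (fun t => decide (|t| = x)) : Int) = (l.count x : Int) + (l.count (-x) : Int) := by
  induction l with
  | nil => simp
  | cons a t ih =>
    rw [List.countP_cons, List.count_cons, List.count_cons]
    by_cases h1 : a = x
    · have hax : (decide (|a| = x)) = true := by
        simp only [decide_eq_true_eq]; rw [h1]; exact abs_of_nonneg (by omega)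
      have h2 : (a == x) = true := by simp [h1]
      have h3 : (a == -x) = false := by simp; omega
      rw [hax, h2, h3]
      push_cast
      omega
    · by_cases h2 : a = -x
      · have hax : (decide (|a| = x)) = true := by
          simp only [decide_eq_true_eq]; rw [h2, abs_neg]; exact abs_of_nonneg (by omega)
        have h3 : (a == x) = false := by simp [h1]
        have h4 : (a == -x) = true := by simp [h2]
        rw [hax, h3, h4]
        push_cast
        omega
      · have hax : (decide (|a| = x)) = false := by
          simp only [decide_eq_false_iff_not]
          rcases abs_choice a with ha | ha <;> omega
        have h3 : (a == x) = false := by simp [h1]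
        have h4 : (a == -x) = false := by simp [h2]
        rw [hax, h3, h4]
        push_cast
        omega

-- countP of a disjunction of disjoint predicates adds
theorem pv_countP_or {α : Type} (l : List α) (p q : α → Bool)
    (hpq : ∀ a ∈ l, ¬(p a = true ∧ q a = true)) :
    l.countP (fun a => p a || q a) = l.countP p + l.countP q := by
  induction l with
  | nil => simp
  | cons a t ih =>
    rw [List.countP_cons, List.countP_cons, List.countP_cons,
        ih (fun x hx => hpq x (List.mem_cons_of_mem a hx))]
    have := hpq a List.mem_cons_self
    by_cases hp : p a = true <;> by_cases hq : q a = true <;> simp [hp, hq] at this ⊢ <;> omega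

-- an empty window once the guard fails
theorem pv_win_zero (keys : List Int) (m d : Int) (hd : 1 ≤ d) (h : ¬ d * d ≤ m) :
    pvWin keys m d = 0 := by
  unfold pvWin
  have hz : keys.countP (fun t => decide (|t| ∣ m ∧ d ≤ |t| ∧ |t| * d ≤ m)) = 0 := by
    rw [List.countP_eq_zero]
    intro t _
    simp only [decide_eq_true_eq]
    rintro ⟨_, ht2, ht3⟩
    have : d * d ≤ |t| * d := mul_le_mul_of_nonneg_right ht2 (by omega)
    linarith
  rw [hz]; rfl

-- B's loop collects exactly the remaining window, by induction on the fuel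
theorem pv_divLoopGo_eq (keys : List Int) (m : Int) (hm : 1 ≤ m) :
    ∀ (fuel : Nat) (d c : Int), 1 ≤ d → (m + 1 - d).toNat = fuel →
      pvDivLoopGo (PySem.Dict.counter keys) m d c fuel = c + pvWin keys m d := by
  intro fuel
  induction fuel with
  | zero =>
    intro d c hd hfuel
    have hng : ¬ d * d ≤ m := by
      intro hg
      have h2 : d * 1 ≤ d * d := mul_le_mul_of_nonneg_left hd (by omega)
      omega
    rw [pvDivLoopGo, pv_win_zero keys m d hd hng]
    ring
  | succ f ih =>
    intro d c hd hfuel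
    rw [pvDivLoopGo]
    by_cases h : d * d ≤ m
    · rw [if_pos h]
      have hdm : d ≤ m := by
        have h2 : d * 1 ≤ d * d := mul_le_mul_of_nonneg_left hd (by omega)
        omega
      rw [ih (d + 1) _ (by omega) (by omega)]
      by_cases hdvd : PySem.Int.mod m d = 0
      · have hdm' : d ∣ m := (PySem.Int.mod_eq_zero_iff_dvd m d).mp hdvd
        have he : PySem.Int.floordiv m d = m / d := PySem.Int.floordiv_eq_ediv_of_pos (by omega)
        set e := m / d with hedef
        have hed : e * d = m := Int.ediv_mul_cancel hdm'
        have hde : d ≤ e := le_of_mul_le_mul_right (by linarith) (by omega : (0:Int) < d)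
        have hepos : (1 : Int) ≤ e := by omega
        -- window split: the window at d is the pair {d, e} plus the window at d+1, disjointly
        have hsplit : pvWin keys m d
            = (keys.countP (fun t => decide (|t| = d) || decide (|t| = e)) : Int) + pvWin keys m (d + 1) := by
          unfold pvWin
          have hcong : keys.countP (fun t => decide (|t| ∣ m ∧ d ≤ |t| ∧ |t| * d ≤ m))
              = keys.countP (fun t => (decide (|t| = d) || decide (|t| = e))
                  || decide (|t| ∣ m ∧ d + 1 ≤ |t| ∧ |t| * (d + 1) ≤ m)) := by
            apply List.countP_congr
            intro t _
            simp only [Bool.or_eq_true, decide_eq_true_eq]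
            constructor
            · rintro ⟨ht1, ht2, ht3⟩
              by_cases hcase : d + 1 ≤ |t| ∧ |t| * (d + 1) ≤ m
              · exact Or.inr ⟨ht1, hcase.1, hcase.2⟩
              · left
                rcases not_and_or.mp hcase with hc | hc
                · left; omega
                · right
                  push_neg at hc
                  obtain ⟨k, hk⟩ := ht1
                  have htpos : (1 : Int) ≤ |t| := by omega
                  have hk1 : d ≤ k := le_of_mul_le_mul_left (by linarith) (by omega : (0:Int) < |t|)
                  have hk2 : k < d + 1 := lt_of_mul_lt_mul_left (by linarith) (by omega : (0:Int) ≤ |t|)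
                  have hkd : k = d := by omega
                  exact mul_right_cancel₀ (by omega : (d:Int) ≠ 0)
                    (by rw [hed]; rw [hk, hkd] : |t| * d = e * d)
            · rintro ((ht | ht) | ⟨ht1, ht2, ht3⟩)
              · exact ⟨ht ▸ hdm', by omega, by rw [ht]; exact h⟩
              · exact ⟨ht ▸ ⟨d, hed.symm⟩, by omega, by rw [ht]; exact le_of_eq hed⟩
              · refine ⟨ht1, by omega, le_trans ?_ ht3⟩
                exact mul_le_mul_of_nonneg_left (by omega) (abs_nonneg t)
          rw [hcong, pv_countP_or keys _ _ (by
            intro t _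
            simp only [Bool.or_eq_true, decide_eq_true_eq]
            rintro ⟨ht | ht, _, _, ht3⟩
            · omega
            · rw [ht] at ht3; nlinarith [hed])]
          push_cast; ring
        -- evaluate the collected pair
        have hpair : (keys.countP (fun t => decide (|t| = d) || decide (|t| = e)) : Int)
            = (keys.count d : Int) + (keys.count (-d) : Int)
              + (if e ≠ d then (keys.count e : Int) + (keys.count (-e) : Int) else 0) := by
          by_cases hne : e = d
          · rw [hne, if_neg (by simp : ¬ (d ≠ d))]
            simp only [Bool.or_self]
            rw [pv_countP_abs_eq keys d (by omega)]
            ring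
          · rw [pv_countP_or keys _ _ (by intro t _; simp only [decide_eq_true_eq]; omega)]
            push_cast
            rw [pv_countP_abs_eq keys d (by omega), pv_countP_abs_eq keys e hepos, if_pos hne]
        rw [hsplit, hpair]
        rw [if_pos hdvd, he]
        simp only [PySem.Dict.getD_counter]
        split_ifs <;> push_cast <;> ring
      · -- d does not divide m: the window at d equals the window at d+1
        rw [if_neg hdvd]
        have hw : pvWin keys m d = pvWin keys m (d + 1) := by
          unfold pvWin
          congr 1
          apply List.countP_congr
          intro t _
          simp only [decide_eq_true_eq]
          have hdndvd : ¬ d ∣ m := fun hc => hdvd ((PySem.Int.mod_eq_zero_iff_dvd m d).mpr hc)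
          constructor
          · rintro ⟨ht1, ht2, ht3⟩
            obtain ⟨k, hk⟩ := ht1
            have htpos : (1 : Int) ≤ |t| := by omega
            have hkd : d + 1 ≤ k := by
              by_contra hc
              push_neg at hc
              have hkge : d ≤ k := le_of_mul_le_mul_left (by linarith) (by omega : (0:Int) < |t|)
              have hkeq : k = d := by omega
              exact hdndvd ⟨|t|, by rw [hk, hkeq]; ring⟩
            refine ⟨⟨k, hk⟩, ?_, ?_⟩
            · by_contra hc
              push_neg at hc
              have hteq : |t| = d := by omega
              exact hdndvd (hteq ▸ ⟨k, hk⟩)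
            · calc |t| * (d + 1) ≤ |t| * k := mul_le_mul_of_nonneg_left hkd (abs_nonneg t)
                _ = m := hk.symm
          · rintro ⟨ht1, ht2, ht3⟩
            refine ⟨ht1, by omega, le_trans ?_ ht3⟩
            exact mul_le_mul_of_nonneg_left (by omega) (abs_nonneg t)
        rw [hw]
    · rw [if_neg h, pv_win_zero keys m d hd h]
      ring

theorem pv_divLoop_eq (keys : List Int) (m d c : Int) (hm : 1 ≤ m) (hd : 1 ≤ d) :
    pvDivLoop (PySem.Dict.counter keys) m d c = c + pvWin keys m d := by
  unfold pvDivLoop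
  exact pv_divLoopGo_eq keys m hm _ d c hd rfl

-- for nonzero u and 0 ∉ keys, A's inner count is the full window at d = 1
theorem pv_cnt_eq_win (keys : List Int) (h0 : (0 : Int) ∉ keys) (u : Int) (hu : u ≠ 0) :
    pvCnt keys u = pvWin keys (|u|) 1 := by
  unfold pvCnt pvWin
  congr 1
  apply List.countP_congr
  intro t ht
  have htz : t ≠ 0 := fun hc => h0 (hc ▸ ht)
  simp only [decide_eq_true_eq]
  constructor
  · intro hmod
    have hdvd : t ∣ u := (PySem.Int.mod_eq_zero_iff_dvd u t).mp hmod
    have h1 : |t| ∣ |u| := (abs_dvd_abs t u).mpr hdvd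
    have h2 : (1 : Int) ≤ |t| := by have := abs_pos.mpr htz; omega
    have h3 : |t| ≤ |u| := Int.le_of_dvd (abs_pos.mpr hu) h1
    exact ⟨h1, h2, by omega⟩
  · rintro ⟨h1, _, _⟩
    exact (PySem.Int.mod_eq_zero_iff_dvd u t).mpr ((abs_dvd_abs t u).mp h1)

-- a running max of a projection is ≤ m iff the seed and every projected element are
theorem pv_foldl_max_le_iff (f : Int → Int) (l : List Int) (i m : Int) :
    l.foldl (fun a x => max a (f x)) i ≤ m ↔ i ≤ m ∧ ∀ x ∈ l, f x ≤ m := by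
  induction l generalizing i with
  | nil => simp
  | cons x t ih =>
    simp only [List.foldl_cons, ih, max_le_iff, List.mem_cons]
    constructor
    · rintro ⟨⟨h1, h2⟩, h3⟩
      exact ⟨h1, fun y hy => hy.elim (fun e => e ▸ h2) (h3 y)⟩
    · rintro ⟨h1, h2⟩
      exact ⟨⟨h1, h2 x (Or.inl rfl)⟩, fun y hy => h2 y (Or.inr hy)⟩

-- two running maxes over lists with the same elements agree
theorem pv_foldl_max_congr (f : Int → Int) (l₁ l₂ : List Int) (i : Int)
    (h : ∀ x, x ∈ l₁ ↔ x ∈ l₂) :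
    l₁.foldl (fun a x => max a (f x)) i = l₂.foldl (fun a x => max a (f x)) i := by
  apply le_antisymm
  · rw [pv_foldl_max_le_iff]
    have h2 := (pv_foldl_max_le_iff f l₂ i _).mp le_rfl
    exact ⟨h2.1, fun x hx => h2.2 x ((h x).mp hx)⟩
  · rw [pv_foldl_max_le_iff]
    have h1 := (pv_foldl_max_le_iff f l₁ i _).mp le_rfl
    exact ⟨h1.1, fun x hx => h1.2 x ((h x).mpr hx)⟩

-- A's running max equals the pvCnt-max over the sorted list
theorem pv_A_max (keys : List Int) :
    (PySem.List.sorted keys (fun x => -x) false).foldl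
        (fun m key => max m ((PySem.List.sorted keys (fun x => -x) false).foldl
          (fun c t => if PySem.Int.mod key t = 0 then c + 1 else c) 0)) 0
      = (PySem.List.sorted keys (fun x => -x) false).foldl
          (fun m key => max m (pvCnt keys key)) 0 := by
  apply PySem.List.foldl_congr_mem
  intro m key _
  congr 1
  rw [PySem.List.foldl_ite_add_one]
  unfold pvCnt
  rw [List.Perm.countP_eq _ (PySem.List.sorted_perm keys (fun x => -x) false)]
  simp

-- ===== VERDICT (by name: the statement is the Claim_ definition above) =====
theorem encryptionValidity_spec : Claim_equal_encryptionValidity := by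
  intro ic vp keys _ hpre
  unfold Spec_encryptionValidity encryptionValidity encryptionValidity_alt
  simp only [PySem.Dict.foldl_insert_getD_add_one_eq_counter, PySem.Dict.keys_counter]
  rw [pv_A_max]
  have hB : (PySem.Set.ofList keys : List Int).foldl
      (fun mx u => if pvDivLoop (PySem.Dict.counter keys) (|u|) 1 0 > mx
          then pvDivLoop (PySem.Dict.counter keys) (|u|) 1 0 else mx) 0
      = (PySem.Set.ofList keys : List Int).foldl (fun m u => max m (pvCnt keys u)) 0 := by
    apply PySem.List.foldl_congr_mem
    intro mx u hu
    have humem : u ∈ keys := (PySem.Set.mem_ofList keys u).mp hu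
    have huz : u ≠ 0 := fun hc => hpre (hc ▸ humem)
    have hm : (1 : Int) ≤ |u| := by have := abs_pos.mpr huz; omega
    rw [pv_divLoop_eq keys (|u|) 1 0 hm le_rfl, zero_add, ← pv_cnt_eq_win keys hpre u huz]
    rw [max_def]
    split_ifs <;> omega
  rw [hB]
  rw [pv_foldl_max_congr (pvCnt keys) _ _ 0
    (fun x => (PySem.List.mem_sorted keys (fun y => -y) false x).trans
      (PySem.Set.mem_ofList keys x).symm)]
  have h5 : (10 : Int) ^ 5 = 100000 := by norm_num
  rw [h5]
  split_ifs <;> simp
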